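-- pv_equiv track=rewrite | github.com/AndrewSamokhvalov/webhook2notion | app.py | add_related_tags
-- ===== SOURCE A (Python) =====
-- tags_relationships = {
--     "o1 visa": ["living"],
--     "robotics": ["interests"],
--     "biology": ["interests"],
--     "startups": ["interests"],
--     "ai": ["interests"],
--     "bitcoin": ["interests"],
--     "sleep": ["health"],
--     "behaviour": ["health"],
--     "automation": ["foundation"],
--     "mental models": ["thinking", "learning"],
--     "weird things to do": ["other"]
-- }
--
-- def add_related_tags(tags):
--     ctags = tags
--     tags = []
--     for tag in ctags:
--         tags.append(tag)
--
--         try: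
--             related_tag = tag
--             while True:
--                 related_tags = tags_relationships[related_tag]
--                 for related_tag in related_tags:
--                     tags.append(related_tag)
--
--         except KeyError:
--             pass
--
--     return tags
-- ===== SOURCE B (Python) =====
-- def _related(tag):
--     if tag == "o1 visa":
--         return ["living"]
--     elif tag in ("robotics", "biology", "startups", "ai", "bitcoin"):
--         return ["interests"]
--     elif tag in ("sleep", "behaviour"):
--         return ["health"]
--     elif tag == "automation":
--         return ["foundation"]
--     elif tag == "mental models":
--         return ["thinking", "learning"]
--     elif tag == "weird things to do":
--         return ["other"]
--     else:
--         return []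
--
--
-- def add_related_tags(tags):
--     out = []
--     for tag in tags:
--         out.append(tag)
--         out.extend(_related(tag))
--     return out
-- ===== Notes on version B (the rewrite author's own statement) =====
-- stated objective: simpler
-- what changed: Replaced the try/except KeyError + while-True chain-following inner loop with a single pass that appends each tag and extends with its related tags, the relationship dict replaced by a pure branch-table helper; exact because no value of the fixed dict is itself a key, so chains never extend.
import Mathlib
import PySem

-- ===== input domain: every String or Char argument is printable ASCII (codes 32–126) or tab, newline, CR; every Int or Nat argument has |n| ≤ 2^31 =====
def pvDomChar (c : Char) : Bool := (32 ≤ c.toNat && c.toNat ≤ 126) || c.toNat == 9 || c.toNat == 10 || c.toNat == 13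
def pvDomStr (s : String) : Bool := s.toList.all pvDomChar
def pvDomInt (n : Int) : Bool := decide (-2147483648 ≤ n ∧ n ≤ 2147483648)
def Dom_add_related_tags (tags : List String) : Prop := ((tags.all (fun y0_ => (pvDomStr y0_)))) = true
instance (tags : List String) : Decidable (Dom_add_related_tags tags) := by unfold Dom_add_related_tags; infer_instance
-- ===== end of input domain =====

-- B replaces A's try/except + while-True chain-following inner loop by a single pass that
-- appends each tag and its related tags from a pure branch-table helper (simpler; exact
-- because no value of the fixed dict is itself a key, so chains never extend).


-- ===== PORT A =====
-- A's module-level dict tags_relationships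
def tagsRel : PySem.Dict String (List String) := PySem.Dict.mk
  [ ("o1 visa", ["living"]),
    ("robotics", ["interests"]),
    ("biology", ["interests"]),
    ("startups", ["interests"]),
    ("ai", ["interests"]),
    ("bitcoin", ["interests"]),
    ("sleep", ["health"]),
    ("behaviour", ["health"]),
    ("automation", ["foundation"]),
    ("mental models", ["thinking", "learning"]),
    ("weird things to do", ["other"]) ]

-- A's inner 'while True' chain: look up related_tag; KeyError ends it; otherwise append the
-- related tags and continue from the last one (Python's for-loop leaves related_tag = last element,
-- unchanged if the list is empty — getLastD).  The fuel only makes the loop total: on the fixed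
-- dict no value is itself a key, so the second lookup always fails and fuel 2 is never exhausted.
def chainA : Nat → String → List String → List String
  | 0, _, acc => acc
  | f + 1, r, acc =>
    match tagsRel.get? r with
    | none => acc
    | some vs => chainA f (vs.getLastD r) (acc ++ vs)

def add_related_tags (tags : List String) : List String :=
  tags.foldl (fun acc tag => chainA 2 tag (acc ++ [tag])) []

-- ===== PORT B =====
-- B's branch-table helper _related
def relatedB (tag : String) : List String :=
  if tag = "o1 visa" then ["living"]
  else if tag = "robotics" ∨ tag = "biology" ∨ tag = "startups" ∨ tag = "ai" ∨ tag = "bitcoin" then ["interests"]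
  else if tag = "sleep" ∨ tag = "behaviour" then ["health"]
  else if tag = "automation" then ["foundation"]
  else if tag = "mental models" then ["thinking", "learning"]
  else if tag = "weird things to do" then ["other"]
  else []

def add_related_tags_alt (tags : List String) : List String :=
  tags.foldl (fun out tag => out ++ [tag] ++ relatedB tag) []

-- ===== PRECONDITION & SPEC =====
def Spec_add_related_tags (tags : List String) (out : List String) : Prop := out = add_related_tags_alt tags
instance (tags : List String) (out : List String) : Decidable (Spec_add_related_tags tags out) := by unfold Spec_add_related_tags; infer_instance

-- ===== CLAIM (what is proved, stated in full; the proofs are below) =====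
def Claim_equal_add_related_tags : Prop := ∀ (tags : List String), Dom_add_related_tags tags → Spec_add_related_tags tags (add_related_tags tags)

-- ===== LEMMAS AND PROOFS =====

-- A's whole per-tag step (append the tag, then follow the chain) equals B's per-tag block.
theorem chainA_eq (t : String) (acc : List String) :
    chainA 2 t (acc ++ [t]) = acc ++ [t] ++ relatedB t := by
  by_cases h1 : t = "o1 visa"
  · subst h1; simp [chainA, tagsRel, relatedB, PySem.Dict.get?, List.find?]
  by_cases h2 : t = "robotics"
  · subst h2; simp [chainA, tagsRel, relatedB, PySem.Dict.get?, List.find?]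
  by_cases h3 : t = "biology"
  · subst h3; simp [chainA, tagsRel, relatedB, PySem.Dict.get?, List.find?]
  by_cases h4 : t = "startups"
  · subst h4; simp [chainA, tagsRel, relatedB, PySem.Dict.get?, List.find?]
  by_cases h5 : t = "ai"
  · subst h5; simp [chainA, tagsRel, relatedB, PySem.Dict.get?, List.find?]
  by_cases h6 : t = "bitcoin"
  · subst h6; simp [chainA, tagsRel, relatedB, PySem.Dict.get?, List.find?]
  by_cases h7 : t = "sleep"
  · subst h7; simp [chainA, tagsRel, relatedB, PySem.Dict.get?, List.find?]
  by_cases h8 : t = "behaviour"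
  · subst h8; simp [chainA, tagsRel, relatedB, PySem.Dict.get?, List.find?]
  by_cases h9 : t = "automation"
  · subst h9; simp [chainA, tagsRel, relatedB, PySem.Dict.get?, List.find?]
  by_cases h10 : t = "mental models"
  · subst h10; simp [chainA, tagsRel, relatedB, PySem.Dict.get?, List.find?]
  by_cases h11 : t = "weird things to do"
  · subst h11; simp [chainA, tagsRel, relatedB, PySem.Dict.get?, List.find?]
  · simp [chainA, tagsRel, relatedB, PySem.Dict.get?, List.find?,
      h1, h2, h3, h4, h5, h6, h7, h8, h9, h10, h11,
      beq_eq_false_iff_ne.mpr (Ne.symm h1), beq_eq_false_iff_ne.mpr (Ne.symm h2),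
      beq_eq_false_iff_ne.mpr (Ne.symm h3), beq_eq_false_iff_ne.mpr (Ne.symm h4),
      beq_eq_false_iff_ne.mpr (Ne.symm h5), beq_eq_false_iff_ne.mpr (Ne.symm h6),
      beq_eq_false_iff_ne.mpr (Ne.symm h7), beq_eq_false_iff_ne.mpr (Ne.symm h8),
      beq_eq_false_iff_ne.mpr (Ne.symm h9), beq_eq_false_iff_ne.mpr (Ne.symm h10),
      beq_eq_false_iff_ne.mpr (Ne.symm h11)]

-- ===== VERDICT (by name: the statement is the Claim_ definition above) =====
theorem add_related_tags_spec : Claim_equal_add_related_tags := by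
  intro tags _
  unfold Spec_add_related_tags add_related_tags add_related_tags_alt
  congr 1
  funext acc tag
  exact chainA_eq tag acc
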